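-- pv_equiv track=rewrite | github.com/rctejon/SlangChallenge | main.py | mostFrecuentNGram
-- ===== SOURCE A (Python) =====
-- def calculateNGrams(text, n):
--     """Calculete n-grams of given string
--
--     Complexity
--     ----------
--     This algorithm have O(t) (linear) complexity where t is the length of "text"
--
--     Parameters
--     ----------
--     text : str
--         The text to calculate ngrams
--     n : int
--         length of the ngrams
--
--     Returns
--     -------
--     list
--         a list of strings that represent the ngrams
--     """
--
--     #Indexes where one ngram could start (this operation have O(t) complexity)
--     indexes=range(len(text)-n+1)
--     #map from the array of indexes where an ngram start to an array that with the ngrams starting by those indexes( This operation have O(t))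
--     return list(map(lambda x: text[x:x+n],indexes))
--
-- def mostFrecuentNGram(text, n):
--     """Calculete the first most frecuent n-gram of given string
--
--     Complexity
--     ----------
--     This algorithm have O(t) (linear) complexity in the average case and O(t^2) (quadratic) in the worst case
--     where t is the length of "text", due to the properties of an Hash Table where the searching and insetion of elements
--     complexity have an average case of O(1) and worst case O(e) where e is the number of elements inserted in the table (Which in this case is t-n+1)
--
--     Parameters
--     ----------
--     text : str
--         The text to calculate ngrams
--     n : int
--         length of the ngrams
--
--     Returns
--     -------
--     str
--         a string which is the most frecuent ngram
--     """
--
--     # Declaration of an empty python dictionary (Hash Table Data Structure) where will be storage the number of appearances of all the ngrams (This operation have a constant complexity)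
--     diccionario={}
--     # Calculation of the text ngrams (This operation have linear complexity)
--     ngrams = calculateNGrams(text,n)
--     # Declaration of auxiliar variable that stores the actual Most Frecuent Ngram( This operation have a constant complexity)
--     actualMostFrecuentNgram = ""
--     # Declaration of auxiliar variable that stores the number of appearences of the actual Most Frecuent Ngram( This operation have a constant complexity)
--     actualMax = 0
--     # Iteration over the ngrans of the text (This operation have O(t) complexity in the average case and O(t^2) in the worst case)
--     for ngram in ngrams:
--         # if the ngram is already in the hash table
--         if ngram in diccionario.keys():
--             #Sum 1 to the value of the ngram in the hash table
--             diccionario[ngram]+=1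
--         # if the ngram is not already in the hash table
--         else:
--             # insert the ngram to the hash table with value 1
--             diccionario[ngram]=1
--         # if the value of ngram is bigger than the actual must frecuent ngram make the change
--         if actualMax < diccionario[ngram]:
--             actualMostFrecuentNgram = ngram
--             actualMax = diccionario[ngram]
--     return actualMostFrecuentNgram
-- ===== SOURCE B (Python) =====
-- def mostFrecuentNGram(text, n):
--     # Two-pass decomposition: count all n-grams, take the global maximum M,
--     # then return the first n-gram whose running count reaches M.
--     ngrams = [text[i:i+n] for i in range(len(text)-n+1)]
--     if not ngrams:
--         return ""
--     counts = {}
--     for g in ngrams: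
--         counts[g] = counts.get(g, 0) + 1
--     m = max(counts.values())
--     running = {}
--     for g in ngrams:
--         c = running.get(g, 0) + 1
--         if c == m:
--             return g
--         running[g] = c
--     return ""
-- ===== Notes on version B (the rewrite author's own statement) =====
-- stated objective: alternative
-- what changed: Single pass with a running maximum replaced by a two-pass decomposition: count all n-grams, compute the global maximum M, then scan again and return the first n-gram whose running count reaches M (early return).
import Mathlib
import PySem

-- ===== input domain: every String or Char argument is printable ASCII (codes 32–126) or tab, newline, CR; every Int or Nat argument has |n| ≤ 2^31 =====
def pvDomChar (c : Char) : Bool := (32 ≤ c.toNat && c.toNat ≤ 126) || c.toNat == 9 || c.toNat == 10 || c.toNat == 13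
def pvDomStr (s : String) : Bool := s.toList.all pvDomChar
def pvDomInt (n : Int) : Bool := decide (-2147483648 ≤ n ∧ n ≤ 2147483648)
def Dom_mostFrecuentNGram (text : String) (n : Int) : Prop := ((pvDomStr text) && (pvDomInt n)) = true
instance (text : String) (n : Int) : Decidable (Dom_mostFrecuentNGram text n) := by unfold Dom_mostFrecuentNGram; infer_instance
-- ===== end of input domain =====

-- B replaces A's single pass with a running maximum by a two-pass scheme (count all
-- n-grams, take the maximum M, return the first n-gram whose running count reaches M);
-- objective: alternative decomposition, same result.

-- ===== PORT A =====
def calculateNGrams (text : String) (n : Int) : List String :=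
  -- indexes = range(len(text)-n+1); list(map(lambda x: text[x:x+n], indexes))
  (PySem.List.pyRange 0 (PySem.Str.len text - n + 1) 1).map
    (fun x => PySem.Str.slice text (some x) (some (x + n)))

-- the body of A's 'for ngram in ngrams' loop, on state (diccionario, best, actualMax)
def aStep (st : PySem.Dict String Int × String × Int) (ngram : String) :
    PySem.Dict String Int × String × Int :=
  let d := if st.1.contains ngram
           then st.1.insert ngram (st.1.getD ngram 0 + 1)
           else st.1.insert ngram 1
  if st.2.2 < d.getD ngram 0 then (d, ngram, d.getD ngram 0) else (d, st.2.1, st.2.2)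

def mostFrecuentNGram (text : String) (n : Int) : String :=
  let ngrams := calculateNGrams text n
  let st := ngrams.foldl aStep (PySem.Dict.empty, "", 0)
  st.2.1

-- ===== PORT B =====
-- B's second loop: first ngram whose running count reaches m (early return)
def bFirstReach (m : Int) (d : PySem.Dict String Int) : List String → String
  | [] => ""
  | g :: t =>
    let c := d.getD g 0 + 1
    if c = m then g else bFirstReach m (d.insert g c) t

def mostFrecuentNGram_alt (text : String) (n : Int) : String :=
  let ngrams := (PySem.List.pyRange 0 (PySem.Str.len text - n + 1) 1).map
    (fun i => PySem.Str.slice text (some i) (some (i + n)))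
  if ngrams.isEmpty then ""
  else
    let counts := ngrams.foldl (fun d g => d.insert g (d.getD g 0 + 1)) PySem.Dict.empty
    match PySem.List.max? counts.values (fun v => v) with
    | none => ""   -- unreachable: counts is nonempty when ngrams is
    | some m => bFirstReach m PySem.Dict.empty ngrams

-- ===== PRECONDITION & SPEC =====
def Spec_mostFrecuentNGram (text : String) (n : Int) (out : String) : Prop := out = mostFrecuentNGram_alt text n
instance (text : String) (n : Int) (out : String) : Decidable (Spec_mostFrecuentNGram text n out) := by unfold Spec_mostFrecuentNGram; infer_instance

-- ===== CLAIM (what is proved, stated in full; the proofs are below) =====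
def Claim_equal_mostFrecuentNGram : Prop := ∀ (text : String) (n : Int), Dom_mostFrecuentNGram text n → Spec_mostFrecuentNGram text n (mostFrecuentNGram text n)

-- ===== LEMMAS AND PROOFS =====

lemma aStep_def (d : PySem.Dict String Int) (best : String) (mx : Int) (g : String) :
    aStep (d, best, mx) g =
      if mx < d.getD g 0 + 1
      then (d.insert g (d.getD g 0 + 1), g, d.getD g 0 + 1)
      else (d.insert g (d.getD g 0 + 1), best, mx) := by
  by_cases hc : d.contains g
  · simp [aStep, hc, PySem.Dict.getD_insert_self]
  · have h0 : d.getD g 0 = 0 :=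
      PySem.Dict.getD_of_not_contains d 0 (by simpa using hc)
    simp [aStep, hc, PySem.Dict.getD_insert_self, h0]

-- once actualMax bounds every future total count, the loop never updates (best, max)
lemma loop_stable (_m : Int) : ∀ (l : List String) (d : PySem.Dict String Int)
    (best : String) (mx : Int),
    (∀ g, d.getD g 0 + (l.count g : Int) ≤ mx) →
    (l.foldl aStep (d, best, mx)).2 = (best, mx) := by
  intro l
  induction l with
  | nil => intro d best mx _; rfl
  | cons g t ih =>
    intro d best mx h
    have hg := h g
    have hgt : (0:Int) < ((g :: t).count g : Int) := by
      have : g ∈ (g :: t) := List.mem_cons_self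
      exact_mod_cast List.count_pos_iff.mpr this
    simp only [List.foldl_cons, aStep_def]
    have hnot : ¬ mx < d.getD g 0 + 1 := by
      have hc : ((g :: t).count g : Int) = (t.count g : Int) + 1 := by
        simp
      omega
    rw [if_neg hnot]
    apply ih
    intro g'
    rw [PySem.Dict.getD_insert]
    by_cases hgg : g' = g
    · subst hgg
      have hc : ((g' :: t).count g' : Int) = (t.count g' : Int) + 1 := by
        simp
      have := h g'
      simp only []
      omega
    · have hc : ((g :: t).count g' : Int) = (t.count g' : Int) := by
        simp [Ne.symm hgg]
      have := h g'
      rw [if_neg hgg]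
      omega

lemma loop_eq (m : Int) : ∀ (l : List String) (d : PySem.Dict String Int)
    (best : String) (mx : Int),
    (∀ g, d.getD g 0 ≤ mx) → mx < m →
    (∀ g, d.getD g 0 + (l.count g : Int) ≤ m) →
    (∃ g, g ∈ l ∧ d.getD g 0 + (l.count g : Int) = m) →
    (l.foldl aStep (d, best, mx)).2.1 = bFirstReach m d l := by
  intro l
  induction l with
  | nil =>
    intro d best mx _ _ _ hex
    rcases hex with ⟨g, hg, _⟩
    simp at hg
  | cons g t ih =>
    intro d best mx hbd hmx hle hex
    have hcntg : ((g :: t).count g : Int) = (t.count g : Int) + 1 := by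
      simp
    have hc_le : d.getD g 0 + 1 ≤ m := by
      have := hle g
      have : (0:Int) ≤ (t.count g : Int) := by positivity
      have := hle g
      omega
    simp only [List.foldl_cons, aStep_def, bFirstReach]
    have hgetins : ∀ g', (d.insert g (d.getD g 0 + 1)).getD g' 0 =
        if g' = g then d.getD g 0 + 1 else d.getD g' 0 := by
      intro g'; rw [PySem.Dict.getD_insert]
    by_cases hcm : d.getD g 0 + 1 = m
    · -- the running count reaches m here: A locks in g, B returns g
      rw [if_pos (by omega), if_pos hcm]
      have hstable := loop_stable m t (d.insert g (d.getD g 0 + 1)) g (d.getD g 0 + 1)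
        (by
          intro g'
          rw [hgetins]
          by_cases hgg : g' = g
          · subst hgg
            have := hle g'
            rw [if_pos rfl]
            omega
          · have hcc : ((g :: t).count g' : Int) = (t.count g' : Int) := by
              simp [Ne.symm hgg]
            have := hle g'
            rw [if_neg hgg]
            omega)
      rw [hstable]
    · -- running count still below m on both sides
      rw [if_neg hcm]
      have hprem1 : ∀ g', (d.insert g (d.getD g 0 + 1)).getD g' 0 + (t.count g' : Int) ≤ m := by
        intro g'
        rw [hgetins]
        by_cases hgg : g' = g
        · subst hgg; rw [if_pos rfl]; have := hle g'; omega
        · have hcc : ((g :: t).count g' : Int) = (t.count g' : Int) := by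
            simp [Ne.symm hgg]
          rw [if_neg hgg]; have := hle g'; omega
      have hprem2 : ∃ g', g' ∈ t ∧ (d.insert g (d.getD g 0 + 1)).getD g' 0 + (t.count g' : Int) = m := by
        rcases hex with ⟨x, hx, hxm⟩
        by_cases hxg : x = g
        · subst hxg
          refine ⟨x, ?_, ?_⟩
          · have : (0:Int) < (t.count x : Int) := by
              by_contra hz
              have : (t.count x : Int) = 0 := by omega
              rw [hcntg] at hxm; omega
            exact List.count_pos_iff.mp (by exact_mod_cast this)
          · rw [hgetins, if_pos rfl]
            rw [hcntg] at hxm; omega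
        · refine ⟨x, ?_, ?_⟩
          · rcases List.mem_cons.mp hx with h | h
            · exact absurd h hxg
            · exact h
          · have hcc : ((g :: t).count x : Int) = (t.count x : Int) := by
              simp [Ne.symm hxg]
            rw [hgetins, if_neg hxg]
            omega
      by_cases hup : mx < d.getD g 0 + 1
      · rw [if_pos hup]
        exact ih (d.insert g (d.getD g 0 + 1)) g (d.getD g 0 + 1)
          (by intro g'; rw [hgetins]; by_cases hgg : g' = g
              · subst hgg; rw [if_pos rfl]
              · rw [if_neg hgg]; have := hbd g'; omega)
          (by omega) hprem1 hprem2
      · rw [if_neg hup]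
        exact ih (d.insert g (d.getD g 0 + 1)) best mx
          (by intro g'; rw [hgetins]; by_cases hgg : g' = g
              · subst hgg; rw [if_pos rfl]; omega
              · rw [if_neg hgg]; exact hbd g')
          hmx hprem1 hprem2

-- ===== VERDICT (by name: the statement is the Claim_ definition above) =====
theorem mostFrecuentNGram_spec : Claim_equal_mostFrecuentNGram := by
  intro text n _
  show mostFrecuentNGram text n = mostFrecuentNGram_alt text n
  unfold mostFrecuentNGram mostFrecuentNGram_alt calculateNGrams
  set l := (PySem.List.pyRange 0 (PySem.Str.len text - n + 1) 1).map
    (fun x => PySem.Str.slice text (some x) (some (x + n))) with hl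
  by_cases hnil : l = []
  · simp [hnil]
  · have hcounter : l.foldl (fun d g => d.insert g (d.getD g 0 + 1)) PySem.Dict.empty
        = PySem.Dict.counter l := PySem.Dict.foldl_insert_getD_add_one_eq_counter l
    have hkeys : (PySem.Dict.counter l).keys = PySem.Set.ofList l :=
      PySem.Dict.keys_counter l
    have hvals : (PySem.Dict.counter l).values =
        ((PySem.Dict.counter l).keys).map (fun k => (PySem.Dict.counter l).getD k 0) :=
      PySem.Dict.values_eq_map_keys _ (PySem.Dict.nodup_keys_counter l) 0
    have hvne : (PySem.Dict.counter l).values ≠ [] := by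
      rcases List.exists_mem_of_ne_nil l hnil with ⟨x, hx⟩
      have hxk : x ∈ (PySem.Dict.counter l).keys := by
        rw [hkeys]; exact (PySem.Set.mem_ofList _ _).mpr hx
      rw [hvals]
      intro hcon
      rw [List.map_eq_nil_iff] at hcon
      rw [hcon] at hxk
      simp at hxk
    obtain ⟨m, hm⟩ : ∃ m, PySem.List.max? (PySem.Dict.counter l).values (fun v => v) = some m := by
      cases hmm : PySem.List.max? (PySem.Dict.counter l).values (fun v => v) with
      | none => exact absurd ((PySem.List.max?_eq_none_iff _ _).mp hmm) hvne
      | some m => exact ⟨m, rfl⟩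
    have hmem : m ∈ (PySem.Dict.counter l).values := PySem.List.max?_mem hm
    have hmax : ∀ y ∈ (PySem.Dict.counter l).values, y ≤ m := PySem.List.max?_isMax hm
    have hexm : ∃ g, g ∈ l ∧ (l.count g : Int) = m := by
      rw [hvals] at hmem
      rcases List.mem_map.mp hmem with ⟨g, hgk, hgv⟩
      rw [hkeys] at hgk
      refine ⟨g, (PySem.Set.mem_ofList _ _).mp hgk, ?_⟩
      rw [← hgv, PySem.Dict.getD_counter]
    rcases hexm with ⟨g0, hg0, hg0m⟩
    have hm_pos : 0 < m := by
      have : 0 < l.count g0 := List.count_pos_iff.mpr hg0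
      omega
    have hcle : ∀ g, (l.count g : Int) ≤ m := by
      intro g
      by_cases hgl : g ∈ l
      · have hv : (l.count g : Int) ∈ (PySem.Dict.counter l).values := by
          rw [hvals]
          refine List.mem_map.mpr ⟨g, ?_, ?_⟩
          · rw [hkeys]; exact (PySem.Set.mem_ofList _ _).mpr hgl
          · rw [PySem.Dict.getD_counter]
        exact hmax _ hv
      · have : l.count g = 0 := List.count_eq_zero.mpr hgl
        omega
    have main : (l.foldl aStep (PySem.Dict.empty, "", 0)).2.1 = bFirstReach m PySem.Dict.empty l := by
      refine loop_eq m l PySem.Dict.empty "" 0 ?_ hm_pos ?_ ?_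
      · intro g; simp [PySem.Dict.getD_empty]
      · intro g; rw [PySem.Dict.getD_empty]; have := hcle g; omega
      · exact ⟨g0, hg0, by rw [PySem.Dict.getD_empty]; omega⟩
    simp only [List.isEmpty_iff, if_neg hnil, hcounter, hm]
    exact main
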